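-- pv_equiv track=rewrite | github.com/LewisLabUCSD/Mito_Trace | BWA-Primers-MT/alignment.py | get_checkpoints
-- ===== SOURCE A (Python) =====
-- def get_checkpoints(bwt, K):
--     '''
--     This function returns a checkpoint matrix from the Burrows-Wheeler Transform.
--     '''
--     counts = dict()
--     unique_symbols = list(set(bwt))
--
--     # Initialize Counts
--     for symbol in unique_symbols:
--         counts[(0, symbol)] = 0
--
--     for i in range(1, len(bwt) + 1):
--         for symbol in unique_symbols:
--             counts[(i, symbol)] = 0
--
--     # Get Counts
--     for i in range(len(bwt)):
--         next_symbol = bwt[i]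
--         for symbol in unique_symbols:
--             if symbol == next_symbol:
--                 counts[(i + 1, symbol)] = counts[(i, symbol)] + 1
--             else:
--                 counts[(i + 1, symbol)] = counts[(i, symbol)]
--
--     # Get checkpoints
--     checkpoints = dict()
--     for key in counts.keys():
--         if key[0] % K == 0:
--             checkpoints[key] = counts[key]
--     return checkpoints
-- ===== SOURCE B (Python) =====
-- def get_checkpoints(bwt, K):
--     '''
--     This function returns a checkpoint matrix from the Burrows-Wheeler Transform.
--     '''
--     order = list(dict.fromkeys(bwt))
--     run = dict.fromkeys(order, 0)
--     checkpoints = {}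
--     for i in range(len(bwt) + 1):
--         if i % K == 0:
--             for s in order:
--                 checkpoints[(i, s)] = run[s]
--         if i < len(bwt):
--             run[bwt[i]] += 1
--     return checkpoints
-- ===== Notes on version B (the rewrite author's own statement) =====
-- stated objective: faster
-- what changed: A builds a full (len+1) x sigma count matrix by rescanning every symbol at every position and then filters rows; B keeps one running-count dict, increments only the current symbol per position, and snapshots a row block only at positions divisible by K.
-- outside the precondition, e.g. on get_checkpoints('', 0): A returns {}, B raises ZeroDivisionError
import Mathlib
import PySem

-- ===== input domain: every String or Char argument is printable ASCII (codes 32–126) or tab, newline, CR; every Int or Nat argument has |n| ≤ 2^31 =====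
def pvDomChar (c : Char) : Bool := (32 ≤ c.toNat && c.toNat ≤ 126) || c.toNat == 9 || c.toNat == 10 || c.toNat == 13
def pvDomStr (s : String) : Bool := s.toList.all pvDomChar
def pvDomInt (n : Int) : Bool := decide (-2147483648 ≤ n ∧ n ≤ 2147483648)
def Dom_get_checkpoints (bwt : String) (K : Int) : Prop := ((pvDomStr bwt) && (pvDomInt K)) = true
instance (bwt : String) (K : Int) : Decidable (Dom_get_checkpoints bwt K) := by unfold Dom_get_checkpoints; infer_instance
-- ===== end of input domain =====

-- B replaces A's per-position scan over all symbols by a single running-count dict (increment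
-- only the current symbol, snapshot every position divisible by K): objective 'faster'.
-- Python symbols (1-char strings) are modelled as Char inside both ports and wrapped to String
-- in the final output; Python's set iteration order is modelled as first-occurrence order in
-- both ports (dict outputs are compared ignoring order).

-- ===== PORT A =====
def get_checkpoints (bwt : String) (K : Int) : List (Int × String × Int) :=
  let chars := bwt.toList
  let unique_symbols := PySem.Set.ofList chars
  -- Initialize Counts
  let counts : PySem.Dict (Int × Char) Int :=
    unique_symbols.foldl (fun d symbol => d.insert ((0 : Int), symbol) 0) PySem.Dict.empty
  let counts :=
    (PySem.List.pyRange 1 ((chars.length : Int) + 1) 1).foldl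
      (fun d i => unique_symbols.foldl (fun d symbol => d.insert (i, symbol) 0) d) counts
  -- Get Counts
  let counts :=
    (PySem.List.pyRange 0 (chars.length : Int) 1).foldl
      (fun d i =>
        match PySem.List.pyGet? chars i with
        | some next_symbol =>
            unique_symbols.foldl
              (fun d symbol =>
                if symbol == next_symbol then
                  d.insert (i + 1, symbol) (d.getD (i, symbol) 0 + 1)
                else
                  d.insert (i + 1, symbol) (d.getD (i, symbol) 0)) d
        | none => d) counts
  -- Get checkpoints
  let checkpoints : PySem.Dict (Int × Char) Int :=
    counts.keys.foldl
      (fun d key =>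
        if PySem.Int.mod key.1 K == 0 then d.insert key (counts.getD key 0) else d)
      PySem.Dict.empty
  checkpoints.items.map (fun p => (p.1.1, String.mk [p.1.2], p.2))

-- ===== PORT B =====
def get_checkpoints_alt (bwt : String) (K : Int) : List (Int × String × Int) :=
  let chars := bwt.toList
  let order := PySem.List.dedup chars
  let run0 : PySem.Dict Char Int := order.foldl (fun d s => d.insert s 0) PySem.Dict.empty
  let st :=
    (PySem.List.pyRange 0 ((chars.length : Int) + 1) 1).foldl
      (fun (st : PySem.Dict (Int × Char) Int × PySem.Dict Char Int) i =>
        let cps :=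
          if PySem.Int.mod i K == 0 then
            order.foldl (fun d s => d.insert (i, s) (st.2.getD s 0)) st.1
          else st.1
        let run :=
          match PySem.List.pyGet? chars i with
          | some c => st.2.modify c 0 (· + 1)
          | none => st.2
        (cps, run))
      ((PySem.Dict.empty : PySem.Dict (Int × Char) Int), run0)
  st.1.items.map (fun p => (p.1.1, String.mk [p.1.2], p.2))

-- ===== PRECONDITION & SPEC =====
-- Pre_ excludes exactly K = 0: Python A raises ZeroDivisionError at 'key[0] % K' whenever the
-- dict has a key, and on the sole remaining input (the empty string) it returns {} only because
-- the division is never reached — B's loop divides at i = 0 and raises there too.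
def Pre_get_checkpoints (bwt : String) (K : Int) : Prop := K ≠ 0
instance (bwt : String) (K : Int) : Decidable (Pre_get_checkpoints bwt K) := by
  unfold Pre_get_checkpoints; infer_instance
def pvWitness_get_checkpoints : String × Int := ("abcab", 2)

def Spec_get_checkpoints (bwt : String) (K : Int) (out : List (Int × String × Int)) : Prop :=
  out = get_checkpoints_alt bwt K
instance (bwt : String) (K : Int) (out : List (Int × String × Int)) :
    Decidable (Spec_get_checkpoints bwt K out) := by unfold Spec_get_checkpoints; infer_instance

-- ===== CLAIM (what is proved, stated in full; the proofs are below) =====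
def Claim_equal_get_checkpoints : Prop := ∀ (bwt : String) (K : Int), Dom_get_checkpoints bwt K → Pre_get_checkpoints bwt K → Spec_get_checkpoints bwt K (get_checkpoints bwt K)

-- ===== LEMMAS AND PROOFS =====

-- the distinct symbols of bwt, first occurrences first
def pvU (chars : List Char) : List Char := PySem.Set.ofList chars
-- number of occurrences of s among the first m characters
def pvCnt (chars : List Char) (m : Nat) (s : Char) : Int := ((chars.take m).count s : Int)
-- the key list of A's `counts` dict after the first m row blocks
def pvKeys (chars : List Char) (m : Nat) : List (Int × Char) :=
  (List.range m).flatMap (fun (i : Nat) => (pvU chars).map (fun s => ((i : Int), s)))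
-- the common canonical item list of the returned checkpoint dict
def pvCanon (chars : List Char) (K : Int) : List ((Int × Char) × Int) :=
  ((List.range (chars.length + 1)).filter (fun (i : Nat) => PySem.Int.mod (i : Int) K == 0)).flatMap
    (fun (i : Nat) => (pvU chars).map (fun s => (((i : Int), s), pvCnt chars i s)))

theorem keys_eq_items_fst {κ ν : Type} [BEq κ] (d : PySem.Dict κ ν) :
    d.keys = d.items.map (·.1) := by
  simp [PySem.Dict.keys]

theorem nodup_pvKeys (chars : List Char) (m : Nat) : (pvKeys chars m).Nodup := by
  induction m with
  | zero => simp [pvKeys]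
  | succ m ih =>
    unfold pvKeys at *
    rw [List.range_succ, List.flatMap_append]
    refine List.Nodup.append ih ?_ ?_
    · simp only [List.flatMap_singleton]
      exact (PySem.Set.nodup_ofList chars).map (fun a b h => (Prod.ext_iff.mp h).2)
    · intro k hk hk'
      simp only [List.flatMap_singleton, List.mem_map] at hk'
      simp only [List.mem_flatMap, List.mem_map, List.mem_range] at hk
      obtain ⟨i, hi, s, _, rfl⟩ := hk
      obtain ⟨t, _, h⟩ := hk'
      have : (m : Int) = (i : Int) := (Prod.ext_iff.mp h).1
      omega

theorem mem_pvKeys (chars : List Char) (m : Nat) (k : Int × Char) :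
    k ∈ pvKeys chars m ↔ ∃ i : Nat, i < m ∧ k.1 = (i : Int) ∧ k.2 ∈ pvU chars := by
  simp only [pvKeys, List.mem_flatMap, List.mem_range, List.mem_map]
  constructor
  · rintro ⟨i, hi, s, hs, rfl⟩; exact ⟨i, hi, rfl, hs⟩
  · rintro ⟨i, hi, h1, h2⟩; exact ⟨i, hi, k.2, h2, by rw [← h1]⟩

-- ---- generic dict helpers ----

theorem contains_false_iff {κ ν : Type} [BEq κ] [LawfulBEq κ] (d : PySem.Dict κ ν) (k : κ) :
    d.contains k = false ↔ k ∉ d.keys := by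
  rw [← Bool.not_eq_true, not_iff_not]
  exact PySem.Dict.contains_iff_mem_keys d k

theorem set_update_of_subset {α : Type} [BEq α] [LawfulBEq α] (s : PySem.Set α) (xs : List α)
    (h : ∀ x ∈ xs, x ∈ s) : PySem.Set.update s xs = s := by
  rw [PySem.Set.update_eq_append_filter]
  have hnil : List.filter (fun y => !PySem.Set.contains s y) (PySem.Set.ofList xs) = [] := by
    rw [List.filter_eq_nil_iff]
    intro a ha
    have : a ∈ s := h a ((PySem.Set.mem_ofList xs a).mp ha)
    simp [(PySem.Set.contains_iff s a).mpr this, this]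
  rw [hnil, List.append_nil]

theorem getD_zero_foldl_insert_zero (l : List Char) (d : PySem.Dict Char Int)
    (h : ∀ s, d.getD s 0 = 0) :
    ∀ s, (l.foldl (fun d s => d.insert s 0) d).getD s 0 = 0 := by
  induction l generalizing d with
  | nil => exact h
  | cons x tl ih =>
    intro s
    refine ih _ (fun t => ?_) s
    rw [PySem.Dict.getD_insert]
    split <;> simp [h]


theorem pvCnt_succ (chars : List Char) (m : Nat) (s : Char) (h : m < chars.length) :
    pvCnt chars (m + 1) s = if s == chars[m] then pvCnt chars m s + 1 else pvCnt chars m s := by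
  unfold pvCnt
  have h1 : chars.take (m + 1) = chars.take m ++ [chars[m]] := by
    rw [List.take_succ, List.getElem?_eq_getElem h]
    rfl
  have h2 : (chars.take m ++ [chars[m]]).count s =
      (chars.take m).count s + if chars[m] = s then 1 else 0 := by
    rw [List.count_append]
    congr 1
    rw [List.count_singleton]
    simp [beq_iff_eq]
  rw [h1, h2]
  by_cases hc : s = chars[m]
  · rw [if_pos hc.symm, if_pos (by simp [hc])]
    push_cast; ring
  · rw [if_neg (fun hx => hc hx.symm), if_neg (by simp [hc])]
    push_cast; ring

theorem pvCnt_not_mem (chars : List Char) (m : Nat) (s : Char) (h : s ∉ chars) :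
    pvCnt chars m s = 0 := by
  unfold pvCnt
  have : s ∉ chars.take m := fun hm => h (List.mem_of_mem_take hm)
  simp [List.count_eq_zero.mpr this]

theorem pvCnt_stable (chars : List Char) (m : Nat) (s : Char) (h : chars.length ≤ m) :
    pvCnt chars (m + 1) s = pvCnt chars m s := by
  unfold pvCnt
  rw [List.take_of_length_le h, List.take_of_length_le (by omega)]

theorem pvU_nodup (chars : List Char) : (pvU chars).Nodup := PySem.Set.nodup_ofList chars

-- ---- A, initialization loops ----

theorem A_init_block (chars : List Char) (i : Int) (d : PySem.Dict (Int × Char) Int)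
    (hfresh : ∀ s ∈ pvU chars, d.contains (i, s) = false) :
    ((pvU chars).foldl (fun d symbol => d.insert (i, symbol) 0) d).items =
      d.items ++ (pvU chars).map (fun s => ((i, s), (0 : Int))) := by
  exact PySem.Dict.items_foldl_insert_fresh (pvU chars) (fun s => (i, s)) (fun _ => 0) d hfresh
    ((PySem.Set.nodup_ofList chars).map (fun a b h => (Prod.ext_iff.mp h).2))

theorem A_init (chars : List Char) (m : Nat) :
    ((List.range m).foldl
        (fun d k => (pvU chars).foldl
          (fun d symbol => d.insert ((1 : Int) + (k : Int), symbol) 0) d)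
        ((pvU chars).foldl (fun d symbol => d.insert ((0 : Int), symbol) 0) PySem.Dict.empty)).items
      = (pvKeys chars (m + 1)).map (fun k => (k, (0 : Int))) := by
  induction m with
  | zero =>
    rw [List.range_zero, List.foldl_nil,
      A_init_block chars 0 PySem.Dict.empty (fun s _ => by simp [PySem.Dict.contains_empty])]
    simp [pvKeys, List.map_map]
    rfl
  | succ m ih =>
    rw [List.range_succ, List.foldl_append, List.foldl_cons, List.foldl_nil]
    have hfresh : ∀ s ∈ pvU chars,
        (((List.range m).foldl
          (fun d k => (pvU chars).foldl
            (fun d symbol => d.insert ((1 : Int) + (k : Int), symbol) 0) d)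
          ((pvU chars).foldl (fun d symbol => d.insert ((0 : Int), symbol) 0)
            (PySem.Dict.empty : PySem.Dict (Int × Char) Int)))).contains
          ((1 : Int) + (m : Int), s) = false := by
      intro s _
      rw [contains_false_iff, keys_eq_items_fst, ih]
      intro hmem
      simp only [List.map_map, List.mem_map, Function.comp] at hmem
      obtain ⟨k, hk, hke⟩ := hmem
      obtain ⟨i, hi, h1, _⟩ := (mem_pvKeys chars (m + 1) k).mp hk
      have : k.1 = (1 : Int) + (m : Int) := by rw [hke]
      omega
    rw [A_init_block chars _ _ hfresh, ih]
    have hkeys : pvKeys chars (m + 1 + 1) = pvKeys chars (m + 1) ++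
        (pvU chars).map (fun s => (((m + 1 : Nat) : Int), s)) := by
      unfold pvKeys
      rw [List.range_succ, List.flatMap_append, List.flatMap_singleton]
    rw [hkeys, List.map_append, List.map_map]
    congr 1
    refine List.map_congr_left (fun s _ => ?_)
    have : ((m + 1 : Nat) : Int) = (1 : Int) + (m : Int) := by omega
    simp [this]

-- ---- A, counting loop ----

theorem A_inner (c : Char) (i : Int) (l : List Char) (hl : l.Nodup)
    (d : PySem.Dict (Int × Char) Int) (key : Int × Char) :
    (l.foldl (fun d symbol =>
        if symbol == c then d.insert (i + 1, symbol) (d.getD (i, symbol) 0 + 1)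
        else d.insert (i + 1, symbol) (d.getD (i, symbol) 0)) d).getD key 0 =
      if key.1 = i + 1 ∧ key.2 ∈ l then
        (if key.2 == c then d.getD (i, key.2) 0 + 1 else d.getD (i, key.2) 0)
      else d.getD key 0 := by
  revert hl
  induction l generalizing d with
  | nil => intro _; simp
  | cons x tl ih =>
    intro hl
    rw [List.foldl_cons]
    have hx : x ∉ tl := (List.nodup_cons.mp hl).1
    have htl : tl.Nodup := (List.nodup_cons.mp hl).2
    -- the head insert, written as a single insert
    have hstep : (if x == c then d.insert (i + 1, x) (d.getD (i, x) 0 + 1)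
        else d.insert (i + 1, x) (d.getD (i, x) 0)) =
        d.insert (i + 1, x) (if x == c then d.getD (i, x) 0 + 1 else d.getD (i, x) 0) := by
      split <;> rfl
    rw [hstep, ih _ htl]
    by_cases h1 : key.1 = i + 1
    · by_cases h2 : key.2 ∈ tl
      · have hne : (i, key.2) ≠ (i + 1, x) := by
          intro h; have := (Prod.ext_iff.mp h).1; omega
        simp only [h1, h2, and_true, if_pos trivial, true_and, if_pos, PySem.Dict.getD_insert,
          hne, if_neg hne]
        simp [hx, h2]
      · by_cases h3 : key.2 = x
        · have hkey : key = (i + 1, x) := Prod.ext_iff.mpr ⟨h1, h3⟩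
          have hne : (i, key.2) ≠ (i + 1, x) := by
            intro h; have := (Prod.ext_iff.mp h).1; omega
          simp only [h2, and_false, if_false, PySem.Dict.getD_insert, hkey, if_pos rfl]
          simp [h1, h3, List.mem_cons]
        · have hne : key ≠ (i + 1, x) := by
            intro h; exact h3 (Prod.ext_iff.mp h).2
          simp only [h2, and_false, if_false, PySem.Dict.getD_insert, if_neg hne]
          have : ¬ (key.1 = i + 1 ∧ key.2 ∈ x :: tl) → True := fun _ => trivial
          simp [h1, List.mem_cons, h3, h2]
    · have hne : key ≠ (i + 1, x) := by intro h; exact h1 (Prod.ext_iff.mp h).1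
      simp [h1, PySem.Dict.getD_insert, hne]

theorem A_inner_keys (c : Char) (i : Int) (chars : List Char)
    (d : PySem.Dict (Int × Char) Int)
    (h : ∀ s ∈ pvU chars, (i + 1, s) ∈ d.keys) :
    ((pvU chars).foldl (fun d symbol =>
        if symbol == c then d.insert (i + 1, symbol) (d.getD (i, symbol) 0 + 1)
        else d.insert (i + 1, symbol) (d.getD (i, symbol) 0)) d).keys = d.keys := by
  have hstep : (fun (d : PySem.Dict (Int × Char) Int) symbol =>
      if symbol == c then d.insert (i + 1, symbol) (d.getD (i, symbol) 0 + 1)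
      else d.insert (i + 1, symbol) (d.getD (i, symbol) 0)) =
      (fun d x => d.insert ((fun s => (i + 1, s)) x)
        ((fun (d : PySem.Dict (Int × Char) Int) x =>
          if x == c then d.getD (i, x) 0 + 1 else d.getD (i, x) 0) d x)) := by
    funext d s; by_cases h : s == c <;> simp [h]
  rw [hstep, PySem.Dict.keys_foldl_insert_key]
  refine set_update_of_subset _ _ ?_
  intro x hx
  simp only [List.mem_map] at hx
  obtain ⟨s, hs, rfl⟩ := hx
  exact h s hs

theorem A_count (chars : List Char) (m : Nat)
    (d0 : PySem.Dict (Int × Char) Int)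
    (hk0 : d0.keys = pvKeys chars (chars.length + 1))
    (hg0 : ∀ key, d0.getD key 0 = 0) :
    m ≤ chars.length →
    ((List.range m).foldl
        (fun d (k : Nat) =>
          match PySem.List.pyGet? chars (k : Int) with
          | some next_symbol =>
              (pvU chars).foldl
                (fun d symbol =>
                  if symbol == next_symbol then
                    d.insert ((k : Int) + 1, symbol) (d.getD ((k : Int), symbol) 0 + 1)
                  else
                    d.insert ((k : Int) + 1, symbol) (d.getD ((k : Int), symbol) 0)) d
          | none => d) d0).keys = pvKeys chars (chars.length + 1) ∧
    ∀ (j : Nat) (s : Char),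
      ((List.range m).foldl
        (fun d (k : Nat) =>
          match PySem.List.pyGet? chars (k : Int) with
          | some next_symbol =>
              (pvU chars).foldl
                (fun d symbol =>
                  if symbol == next_symbol then
                    d.insert ((k : Int) + 1, symbol) (d.getD ((k : Int), symbol) 0 + 1)
                  else
                    d.insert ((k : Int) + 1, symbol) (d.getD ((k : Int), symbol) 0)) d
          | none => d) d0).getD ((j : Int), s) 0 =
        if j ≤ m then pvCnt chars j s else 0 := by
  induction m with
  | zero =>
    intro _
    refine ⟨by simpa using hk0, ?_⟩
    intro j s
    rw [List.range_zero, List.foldl_nil, hg0]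
    by_cases hj : j ≤ 0
    · have hj0 : j = 0 := by omega
      simp [hj0, pvCnt]
    · simp [hj]
  | succ m ih =>
    intro hm
    obtain ⟨ihk, ihg⟩ := ih (by omega)
    have hget : PySem.List.pyGet? chars ((m : Nat) : Int) = some (chars[m]'(by omega)) := by
      rw [PySem.List.pyGet?_natCast]
      exact List.getElem?_eq_getElem (by omega)
    have hstep : ∀ d : PySem.Dict (Int × Char) Int,
        (match PySem.List.pyGet? chars ((m : Nat) : Int) with
         | some next_symbol =>
             (pvU chars).foldl
               (fun d symbol =>
                 if symbol == next_symbol then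
                   d.insert (((m : Nat) : Int) + 1, symbol) (d.getD (((m : Nat) : Int), symbol) 0 + 1)
                 else
                   d.insert (((m : Nat) : Int) + 1, symbol) (d.getD (((m : Nat) : Int), symbol) 0)) d
         | none => d) =
        (pvU chars).foldl
          (fun d symbol =>
            if symbol == chars[m]'(by omega) then
              d.insert (((m : Nat) : Int) + 1, symbol) (d.getD (((m : Nat) : Int), symbol) 0 + 1)
            else
              d.insert (((m : Nat) : Int) + 1, symbol) (d.getD (((m : Nat) : Int), symbol) 0)) d := by
      intro d; rw [hget]
    rw [List.range_succ, List.foldl_append, List.foldl_cons, List.foldl_nil, hstep]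
    constructor
    · rw [A_inner_keys]
      · exact ihk
      · intro s hs
        rw [ihk, mem_pvKeys]
        exact ⟨m + 1, by omega, by push_cast; ring, by simpa [pvU] using hs⟩
    · intro j s
      rw [A_inner _ _ _ (pvU_nodup chars)]
      by_cases h1 : ((j : Int), s).1 = (m : Int) + 1
      · have hj : j = m + 1 := by
          have h1' : (j : Int) = (m : Int) + 1 := h1
          omega
        subst hj
        by_cases h2 : s ∈ pvU chars
        · rw [if_pos ⟨h1, h2⟩]
          have hprev := ihg m s
          rw [if_pos (le_refl m)] at hprev
          rw [hprev, if_pos (le_refl (m + 1)), pvCnt_succ chars m s (by omega)]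
        · rw [if_neg (fun hc => h2 hc.2), ihg (m + 1) s]
          have hsm : s ∉ chars := fun hc => h2 ((PySem.Set.mem_ofList chars s).mpr hc)
          rw [if_neg (by omega), if_pos (le_refl (m + 1)), pvCnt_not_mem chars (m + 1) s hsm]
      · rw [if_neg (fun hc => h1 hc.1), ihg j s]
        have hj : j ≠ m + 1 := by
          intro hc
          apply h1
          show (j : Int) = (m : Int) + 1
          omega
        by_cases hjm : j ≤ m
        · rw [if_pos hjm, if_pos (by omega)]
        · rw [if_neg hjm, if_neg (by omega)]

-- ---- checkpoint filter loop ----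

theorem cp_fold (P : (Int × Char) → Bool) (v : (Int × Char) → Int) :
    ∀ (l : List (Int × Char)) (d : PySem.Dict (Int × Char) Int), l.Nodup →
      (∀ k ∈ l, d.contains k = false) →
      (l.foldl (fun d key => if P key then d.insert key (v key) else d) d).items =
        d.items ++ (l.filter P).map (fun k => (k, v k))
  | [], d, _, _ => by simp
  | x :: tl, d, hl, hf => by
    rw [List.foldl_cons]
    have hx : x ∉ tl := (List.nodup_cons.mp hl).1
    have htl : tl.Nodup := (List.nodup_cons.mp hl).2
    by_cases hp : P x
    · rw [if_pos hp]
      have hfx : d.contains x = false := hf x List.mem_cons_self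
      have hftl : ∀ k ∈ tl, (d.insert x (v x)).contains k = false := by
        intro k hk
        rw [PySem.Dict.contains_insert]
        have hne : k ≠ x := fun h => hx (h ▸ hk)
        simp [hne, hf k (List.mem_cons_of_mem _ hk)]
      rw [cp_fold P v tl _ htl hftl, PySem.Dict.items_insert_of_not_contains _ _ hfx]
      simp [List.filter_cons, hp]
    · rw [if_neg hp,
        cp_fold P v tl _ htl (fun k hk => hf k (List.mem_cons_of_mem _ hk))]
      simp [List.filter_cons, hp]

theorem flatMap_if_filter {α β : Type} (q : α → Bool) (f : α → List β) (l : List α) :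
    (l.filter q).flatMap f = l.flatMap (fun a => if q a then f a else []) := by
  induction l with
  | nil => simp
  | cons x tl ih => by_cases hq : q x <;> simp [List.filter_cons, hq, ih]

theorem filtered_keys (chars : List Char) (K : Int) (g : (Int × Char) → Int)
    (hg : ∀ i : Nat, i ≤ chars.length → ∀ s ∈ pvU chars, g ((i : Int), s) = pvCnt chars i s) :
    ((pvKeys chars (chars.length + 1)).filter (fun key => PySem.Int.mod key.1 K == 0)).map
      (fun k => (k, g k)) = pvCanon chars K := by
  unfold pvKeys pvCanon
  rw [List.filter_flatMap, List.map_flatMap, flatMap_if_filter]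
  refine List.flatMap_congr (fun i hi => ?_)
  have hi' : i ≤ chars.length := by
    have := List.mem_range.mp hi; omega
  by_cases hmod : PySem.Int.mod (i : Int) K == 0
  · rw [if_pos hmod]
    have hfil : ((pvU chars).map (fun s => ((i : Int), s))).filter
        (fun key => PySem.Int.mod key.1 K == 0) = (pvU chars).map (fun s => ((i : Int), s)) := by
      refine List.filter_eq_self.mpr ?_
      intro a ha
      obtain ⟨t, _, rfl⟩ := List.mem_map.mp ha
      exact hmod
    rw [hfil, List.map_map]
    exact List.map_congr_left (fun s hs => by simp [Function.comp, hg i hi' s hs])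
  · rw [if_neg hmod]
    have hfil : ((pvU chars).map (fun s => ((i : Int), s))).filter
        (fun key => PySem.Int.mod key.1 K == 0) = [] := by
      refine List.filter_eq_nil_iff.mpr ?_
      intro a ha
      obtain ⟨t, _, rfl⟩ := List.mem_map.mp ha
      exact fun hc => hmod hc
    rw [hfil]
    simp

-- ---- the two loop results as proof-side names ----

def pvD0 (chars : List Char) : PySem.Dict (Int × Char) Int :=
  (List.range chars.length).foldl
    (fun d (k : Nat) => (pvU chars).foldl
      (fun d symbol => d.insert ((1 : Int) + (k : Int), symbol) 0) d)
    ((pvU chars).foldl (fun d symbol => d.insert ((0 : Int), symbol) 0) PySem.Dict.empty)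

def pvCounts (chars : List Char) : PySem.Dict (Int × Char) Int :=
  (List.range chars.length).foldl
    (fun d (k : Nat) =>
      match PySem.List.pyGet? chars (k : Int) with
      | some next_symbol =>
          (pvU chars).foldl
            (fun d symbol =>
              if symbol == next_symbol then
                d.insert ((k : Int) + 1, symbol) (d.getD ((k : Int), symbol) 0 + 1)
              else
                d.insert ((k : Int) + 1, symbol) (d.getD ((k : Int), symbol) 0)) d
      | none => d) (pvD0 chars)

def pvCp (chars : List Char) (K : Int) : PySem.Dict (Int × Char) Int :=
  (pvCounts chars).keys.foldl
    (fun d key =>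
      if PySem.Int.mod key.1 K == 0 then d.insert key ((pvCounts chars).getD key 0) else d)
    PySem.Dict.empty

theorem pvD0_items (chars : List Char) :
    (pvD0 chars).items = (pvKeys chars (chars.length + 1)).map (fun k => (k, (0 : Int))) := by
  unfold pvD0
  exact A_init chars chars.length

theorem pvD0_keys (chars : List Char) : (pvD0 chars).keys = pvKeys chars (chars.length + 1) := by
  rw [keys_eq_items_fst, pvD0_items, List.map_map]
  rw [show ((fun (p : (Int × Char) × Int) => p.1) ∘ (fun k => (k, (0 : Int)))) = id from rfl,
    List.map_id]

theorem pvD0_getD (chars : List Char) : ∀ key, (pvD0 chars).getD key 0 = 0 := by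
  intro key
  by_cases hc : (pvD0 chars).contains key
  · have hk : key ∈ pvKeys chars (chars.length + 1) := by
      rw [← pvD0_keys]
      exact (PySem.Dict.contains_iff_mem_keys _ _).mp hc
    have hmem : (key, (0 : Int)) ∈ (pvD0 chars).items := by
      rw [pvD0_items]
      exact List.mem_map.mpr ⟨key, hk, rfl⟩
    exact PySem.Dict.getD_of_mem_items _ hmem
      (by rw [pvD0_keys]; exact nodup_pvKeys chars _) 0
  · exact PySem.Dict.getD_of_not_contains _ _ (by simpa using hc)

theorem pvCounts_spec (chars : List Char) :
    (pvCounts chars).keys = pvKeys chars (chars.length + 1) ∧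
    ∀ (j : Nat) (s : Char), (pvCounts chars).getD ((j : Int), s) 0 =
      if j ≤ chars.length then pvCnt chars j s else 0 :=
  A_count chars chars.length (pvD0 chars) (pvD0_keys chars) (pvD0_getD chars) (le_refl _)

theorem pvCp_items (chars : List Char) (K : Int) :
    (pvCp chars K).items = pvCanon chars K := by
  obtain ⟨hkeys, hgetD⟩ := pvCounts_spec chars
  unfold pvCp
  rw [hkeys, cp_fold _ _ _ _ (nodup_pvKeys chars _)
    (fun k _ => PySem.Dict.contains_empty k)]
  have hemp : (PySem.Dict.empty : PySem.Dict (Int × Char) Int).items = [] := rfl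
  rw [hemp, List.nil_append]
  refine filtered_keys chars K _ ?_
  intro i hi s _
  rw [hgetD i s, if_pos hi]

-- ---- B side ----

def pvRun0 (chars : List Char) : PySem.Dict Char Int :=
  (pvU chars).foldl (fun d s => d.insert s 0) PySem.Dict.empty

def pvBst (chars : List Char) (K : Int) (m : Nat) :
    PySem.Dict (Int × Char) Int × PySem.Dict Char Int :=
  (List.range m).foldl
    (fun (st : PySem.Dict (Int × Char) Int × PySem.Dict Char Int) (k : Nat) =>
      (if PySem.Int.mod ((k : Int)) K == 0 then
         (pvU chars).foldl (fun d s => d.insert ((k : Int), s) (st.2.getD s 0)) st.1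
       else st.1,
       match PySem.List.pyGet? chars (k : Int) with
       | some c => st.2.modify c 0 (· + 1)
       | none => st.2))
    (PySem.Dict.empty, pvRun0 chars)

theorem pvRun0_keys (chars : List Char) : (pvRun0 chars).keys = pvU chars := by
  unfold pvRun0
  rw [PySem.Dict.keys_foldl_insert (pvU chars) (fun _ _ => (0 : Int)) PySem.Dict.empty,
    PySem.Dict.keys_empty, PySem.Set.update_nil_left]
  unfold pvU
  exact PySem.Set.ofList_ofList chars

theorem pvRun0_getD (chars : List Char) : ∀ s, (pvRun0 chars).getD s 0 = 0 :=
  getD_zero_foldl_insert_zero (pvU chars) PySem.Dict.empty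
    (fun s => PySem.Dict.getD_empty s 0)

theorem pvBst_spec (chars : List Char) (K : Int) (m : Nat) :
    m ≤ chars.length + 1 →
    ((pvBst chars K m).1.items =
      ((List.range m).filter (fun (i : Nat) => PySem.Int.mod (i : Int) K == 0)).flatMap
        (fun (i : Nat) => (pvU chars).map (fun s => (((i : Int), s), pvCnt chars i s))) ∧
     (pvBst chars K m).2.keys = pvU chars ∧
     ∀ s, (pvBst chars K m).2.getD s 0 = pvCnt chars m s) := by
  induction m with
  | zero =>
    intro _
    refine ⟨by simp [pvBst]; rfl, by simp [pvBst, pvRun0_keys], ?_⟩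
    intro s
    simp [pvBst, pvRun0_getD chars s, pvCnt]
  | succ m ih =>
    intro hm
    obtain ⟨ih1, ih2, ih3⟩ := ih (by omega)
    have hunf : pvBst chars K (m + 1) =
        (if PySem.Int.mod ((m : Int)) K == 0 then
           (pvU chars).foldl
             (fun d s => d.insert ((m : Int), s) ((pvBst chars K m).2.getD s 0))
             (pvBst chars K m).1
         else (pvBst chars K m).1,
         match PySem.List.pyGet? chars (m : Int) with
         | some c => (pvBst chars K m).2.modify c 0 (· + 1)
         | none => (pvBst chars K m).2) := by
      unfold pvBst
      rw [List.range_succ, List.foldl_append, List.foldl_cons, List.foldl_nil]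
    constructor
    · -- checkpoint dict component
      rw [hunf]
      have hfresh : ∀ s ∈ pvU chars, (pvBst chars K m).1.contains ((m : Int), s) = false := by
        intro s _
        rw [contains_false_iff, keys_eq_items_fst, ih1]
        intro hmem
        obtain ⟨p, hp, hpe⟩ := List.mem_map.mp hmem
        obtain ⟨i, hi, hpin⟩ := List.mem_flatMap.mp hp
        obtain ⟨t, _, rfl⟩ := List.mem_map.mp hpin
        have hilt : i < m := List.mem_range.mp (List.mem_of_mem_filter hi)
        have : (i : Int) = (m : Int) := (Prod.ext_iff.mp hpe).1
        omega
      rw [List.range_succ, List.filter_append, List.flatMap_append]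
      by_cases hmod : PySem.Int.mod ((m : Int)) K == 0
      · rw [if_pos hmod]
        rw [PySem.Dict.items_foldl_insert_fresh (pvU chars)
          (fun s => (((m : Nat) : Int), s)) (fun s => (pvBst chars K m).2.getD s 0)
          (pvBst chars K m).1 hfresh
          ((pvU_nodup chars).map (fun a b h => (Prod.ext_iff.mp h).2)), ih1]
        congr 1
        have hfil : List.filter (fun (i : Nat) => PySem.Int.mod (i : Int) K == 0) [m] = [m] := by
          simp [hmod]
        rw [hfil, List.flatMap_singleton]
        exact List.map_congr_left (fun s _ => by rw [ih3 s])
      · rw [if_neg hmod]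
        have hfil : List.filter (fun (i : Nat) => PySem.Int.mod (i : Int) K == 0) [m] = [] := by
          simp only [List.filter_cons, List.filter_nil]
          rw [if_neg (by simpa using hmod)]
        rw [hfil, List.flatMap_nil, List.append_nil, ih1]
    · -- running-count dict component
      rw [hunf]
      by_cases hlt : m < chars.length
      · have hget : PySem.List.pyGet? chars ((m : Nat) : Int) = some (chars[m]'hlt) := by
          rw [PySem.List.pyGet?_natCast]
          exact List.getElem?_eq_getElem hlt
        rw [hget]
        constructor
        · rw [PySem.Dict.keys_modify, PySem.Dict.keys_insert_of_contains _ _ ?_, ih2]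
          rw [PySem.Dict.contains_iff_mem_keys, ih2]
          unfold pvU
          exact (PySem.Set.mem_ofList chars _).mpr (List.getElem_mem hlt)
        · intro s
          rw [PySem.Dict.getD_modify, pvCnt_succ chars m s hlt]
          by_cases hs : s = chars[m]'hlt
          · rw [if_pos hs, if_pos (by simp [hs]), ih3, hs]
          · rw [if_neg hs, if_neg (by simp [hs]), ih3]
      · have hget : PySem.List.pyGet? chars ((m : Nat) : Int) = none := by
          rw [PySem.List.pyGet?_natCast]
          exact List.getElem?_eq_none (by omega)
        rw [hget]
        refine ⟨ih2, ?_⟩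
        intro s
        rw [pvCnt_stable chars m s (by omega)]
        exact ih3 s

-- ---- assembly ----

theorem A_eq_canon (bwt : String) (K : Int) :
    get_checkpoints bwt K =
      (pvCanon bwt.toList K).map (fun p => (p.1.1, String.mk [p.1.2], p.2)) := by
  have h1 : ((bwt.toList.length : Int) + 1 - 1).toNat = bwt.toList.length := by omega
  unfold get_checkpoints
  simp only [PySem.List.pyRange_one, h1, List.foldl_map, zero_add, sub_zero,
    Int.toNat_natCast]
  refine congrArg (List.map _) ?_
  show (pvCp bwt.toList K).items = pvCanon bwt.toList K
  exact pvCp_items bwt.toList K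

theorem B_eq_canon (bwt : String) (K : Int) :
    get_checkpoints_alt bwt K =
      (pvCanon bwt.toList K).map (fun p => (p.1.1, String.mk [p.1.2], p.2)) := by
  have h1 : ((bwt.toList.length : Int) + 1) = ((bwt.toList.length + 1 : Nat) : Int) := by
    push_cast; ring
  unfold get_checkpoints_alt
  simp only [PySem.List.pyRange_one, List.foldl_map, zero_add, sub_zero, h1,
    Int.toNat_natCast]
  refine congrArg (List.map _) ?_
  show (pvBst bwt.toList K (bwt.toList.length + 1)).1.items = pvCanon bwt.toList K
  have := (pvBst_spec bwt.toList K (bwt.toList.length + 1) (le_refl _)).1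
  rw [this]
  rfl

-- ===== VERDICT (by name: the statement is the Claim_ definition above) =====
theorem get_checkpoints_spec : Claim_equal_get_checkpoints := by
  intro bwt K _hdom _hpre
  unfold Spec_get_checkpoints
  rw [A_eq_canon, B_eq_canon]
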